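-- pv_equiv track=rewrite | github.com/cwyss/student-manager | helpers/slexam-importer.py | separate_by_subject
-- ===== SOURCE A (Python) =====
-- def separate_by_subject(regist):
--     regist_by_subject = {}
--     for reg in regist.values():
--         try:
--             subj = reg['subject']
--         except KeyError:
--             subj = 'unknown'
--         if subj in regist_by_subject:
--             regist_by_subject[subj].append(reg)
--         else:
--             regist_by_subject[subj] = [reg]
--     return regist_by_subject
-- ===== SOURCE B (Python) =====
-- def separate_by_subject(regist):
--     def subject_of(reg):
--         try:
--             return reg['subject']
--         except KeyError:
--             return 'unknown'
--     regs = list(regist.values())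
--     subjects = []
--     for r in regs:
--         s = subject_of(r)
--         if s not in subjects:
--             subjects.append(s)
--     return {s: [r for r in regs if subject_of(r) == s] for s in subjects}
-- ===== Notes on version B (the rewrite author's own statement) =====
-- stated objective: alternative
-- what changed: Replaces the single-pass dict grouping (membership test plus append-or-insert per element) with a two-phase decomposition: first collect the distinct subjects in first-occurrence order, then build each group by filtering the value list, as a dict comprehension.
import Mathlib
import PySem

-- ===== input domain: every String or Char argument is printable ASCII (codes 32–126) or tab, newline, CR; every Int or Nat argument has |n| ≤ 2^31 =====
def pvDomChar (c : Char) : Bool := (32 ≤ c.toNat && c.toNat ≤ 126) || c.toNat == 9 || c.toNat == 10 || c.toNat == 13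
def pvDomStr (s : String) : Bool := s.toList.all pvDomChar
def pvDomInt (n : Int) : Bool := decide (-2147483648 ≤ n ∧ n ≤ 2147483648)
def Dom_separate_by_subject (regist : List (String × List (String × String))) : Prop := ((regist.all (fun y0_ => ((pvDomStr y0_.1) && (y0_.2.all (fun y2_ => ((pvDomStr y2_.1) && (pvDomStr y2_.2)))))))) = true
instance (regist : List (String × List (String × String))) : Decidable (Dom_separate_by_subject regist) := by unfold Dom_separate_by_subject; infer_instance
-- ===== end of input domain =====

-- ===== PORT A =====
-- B differs from A by a two-phase decomposition (distinct subjects first, then one filter per subject); objective: alternative.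
-- A-side helper: reg['subject'] with try/except KeyError -> 'unknown'
def subjA (reg : List (String × String)) : String :=
  match (PySem.Dict.mk reg).get? "subject" with
  | some s => s
  | none => "unknown"

def separate_by_subject (regist : List (String × List (String × String))) : List (String × List (List (String × String))) :=
  ((regist.map (·.2)).foldl
    (fun d reg =>
      if d.contains (subjA reg) then d.modify (subjA reg) [] (· ++ [reg])
      else d.insert (subjA reg) [reg])
    PySem.Dict.empty).items

-- ===== PORT B =====
-- B-side helper: reg.get('subject') default 'unknown'
def subjB (reg : List (String × String)) : String :=
  ((PySem.Dict.mk reg).get? "subject").getD "unknown"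

def separate_by_subject_alt (regist : List (String × List (String × String))) : List (String × List (List (String × String))) :=
  let regs := regist.map (·.2)
  let subjects : PySem.Set String := regs.foldl (fun acc r => PySem.Set.add acc (subjB r)) []
  subjects.map (fun s => (s, regs.filter (fun r => subjB r == s)))

-- ===== PRECONDITION & SPEC =====
def Spec_separate_by_subject (regist : List (String × List (String × String))) (out : List (String × List (List (String × String)))) : Prop := out = separate_by_subject_alt regist
instance (regist : List (String × List (String × String))) (out : List (String × List (List (String × String)))) : Decidable (Spec_separate_by_subject regist out) := by unfold Spec_separate_by_subject; infer_instance

-- ===== CLAIM (what is proved, stated in full; the proofs are below) =====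
def Claim_equal_separate_by_subject : Prop := ∀ (regist : List (String × List (String × String))), Dom_separate_by_subject regist → Spec_separate_by_subject regist (separate_by_subject regist)

-- ===== LEMMAS AND PROOFS =====
theorem subjA_eq_subjB (reg : List (String × String)) : subjA reg = subjB reg := by
  unfold subjA subjB
  cases (PySem.Dict.mk reg).get? "subject" <;> rfl

theorem modify_eq_insert_getD {κ ν : Type} [BEq κ] [LawfulBEq κ] (d : PySem.Dict κ ν) (k : κ) (d0 : ν) (f : ν → ν) :
    d.modify k d0 f = d.insert k (f (d.getD k d0)) := by
  simp [PySem.Dict.modify, PySem.Dict.insert, PySem.Dict.getD, PySem.Dict.get?, PySem.Dict.contains]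

theorem stepA_eq_modify (d : PySem.Dict String (List (List (String × String)))) (reg : List (String × String)) :
    (if d.contains (subjA reg) then d.modify (subjA reg) [] (· ++ [reg])
     else d.insert (subjA reg) [reg]) = d.modify (subjA reg) [] (· ++ [reg]) := by
  by_cases h : d.contains (subjA reg) = true
  · simp [h]
  · simp only [Bool.not_eq_true] at h
    rw [if_neg (by simp [h]), modify_eq_insert_getD, PySem.Dict.getD_of_not_contains _ _ h]
    rfl

theorem separate_by_subject_spec : Claim_equal_separate_by_subject := by
  intro regist _
  unfold Spec_separate_by_subject separate_by_subject separate_by_subject_alt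
  dsimp only []
  rw [PySem.List.foldl_congr_mem _ _ (fun d reg => d.modify (subjA reg) [] (· ++ [reg])) _
      (fun acc x _ => stepA_eq_modify acc x)]
  have hmap : (regist.map (·.2)).foldl (fun d reg => d.modify (subjA reg) [] (· ++ [reg]))
        PySem.Dict.empty
      = (regist.map (fun y => (subjA y.2, y.2))).foldl
          (fun d p => d.modify p.1 [] (· ++ [p.2])) PySem.Dict.empty := by
    rw [List.foldl_map, List.foldl_map]
  rw [hmap]
  set l := regist.map (fun y => (subjA y.2, y.2)) with hl
  have hnd : (l.foldl (fun d p => d.modify p.1 [] (· ++ [p.2])) PySem.Dict.empty).keys.Nodup :=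
    PySem.Dict.nodup_keys_foldl_modify_key l Prod.fst [] (fun _ p => (· ++ [p.2])) _
      PySem.Dict.nodup_keys_empty
  rw [PySem.Dict.items_eq_map_keys _ hnd []]
  have hkeys : (l.foldl (fun d p => d.modify p.1 [] (· ++ [p.2])) PySem.Dict.empty).keys
      = PySem.Set.ofList ((regist.map (·.2)).map subjA) := by
    rw [PySem.Dict.keys_foldl_modify_key l Prod.fst [] (fun _ p => (· ++ [p.2])) PySem.Dict.empty,
        hl, List.map_map, List.map_map]
    rfl
  rw [hkeys]
  have hsubjects : ((regist.map (·.2)).foldl (fun acc r => PySem.Set.add acc (subjB r)) []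
        : PySem.Set String)
      = PySem.Set.ofList ((regist.map (·.2)).map subjA) := by
    simp only [← subjA_eq_subjB]
    rw [← List.foldl_map]
    rfl
  rw [hsubjects]
  apply List.map_congr_left
  intro s _
  refine Prod.ext rfl ?_
  rw [PySem.Dict.getD_foldl_modify_append]
  simp [hl, List.filter_map, List.map_map, Function.comp_def, subjA_eq_subjB]
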